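-- pv_equiv track=rewrite | github.com/leeg1027/coding_test_practice | 프로그래머스/2/132265. 롤케이크 자르기/롤케이크 자르기.py | solution
-- ===== SOURCE A (Python) =====
-- def solution(topping):
--     result = 0
--
--     left_set = set()
--     left_unique = []
--     for t in topping:
--         left_set.add(t)
--         left_unique.append(len(left_set))
--
--     right_set = set()
--     right_unique = []
--     for t in reversed(topping):
--         right_set.add(t)
--         right_unique.append(len(right_set))
--     right_unique.reverse()
--
--     for i in range(len(topping) - 1):
--         if left_unique[i] == right_unique[i + 1]:
--             result += 1
--
--     return result
-- ===== SOURCE B (Python) =====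
-- def solution(topping):
--     right = {}
--     for t in topping:
--         right[t] = right.get(t, 0) + 1
--     left = set()
--     result = 0
--     for t in topping[:-1]:
--         left.add(t)
--         right[t] -= 1
--         if right[t] == 0:
--             del right[t]
--         if len(left) == len(right):
--             result += 1
--     return result
-- ===== Notes on version B (the rewrite author's own statement) =====
-- stated objective: idiomatic
-- what changed: Replaces A's two precomputed prefix/suffix unique-count arrays plus a third comparison pass with a single pass that maintains a live left set and a right multiset counter (decrement and delete keys as the cut moves), comparing their sizes at each cut.
import Mathlib
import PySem

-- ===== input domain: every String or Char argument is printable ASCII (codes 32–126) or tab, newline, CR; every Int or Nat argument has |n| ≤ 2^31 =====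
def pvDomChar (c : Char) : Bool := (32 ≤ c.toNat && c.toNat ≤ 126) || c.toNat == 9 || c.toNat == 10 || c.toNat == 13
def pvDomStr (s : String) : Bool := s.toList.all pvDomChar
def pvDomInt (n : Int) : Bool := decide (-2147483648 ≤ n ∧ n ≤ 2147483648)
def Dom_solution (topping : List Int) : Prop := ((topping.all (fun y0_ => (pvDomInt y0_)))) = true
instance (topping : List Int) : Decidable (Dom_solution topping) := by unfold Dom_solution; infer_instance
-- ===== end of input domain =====

-- B replaces A's two precomputed prefix/suffix unique-count arrays plus a comparison pass by a
-- single pass maintaining a live left set and a right multiset counter; same O(n) cost (objective: idiomatic).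

-- ===== PORT A =====
def solution (topping : List Int) : Int :=
  let lp := topping.foldl (fun (st : PySem.Set Int × List Int) t =>
      let s := PySem.Set.add st.1 t
      (s, st.2 ++ [PySem.Set.len s])) (PySem.Set.empty, [])
  let leftU := lp.2
  let rp := topping.reverse.foldl (fun (st : PySem.Set Int × List Int) t =>
      let s := PySem.Set.add st.1 t
      (s, st.2 ++ [PySem.Set.len s])) (PySem.Set.empty, [])
  let rightU := rp.2.reverse
  -- for i in range(len(topping)-1): both indices i and i+1 are always in range, so pyGetD is exact here
  (PySem.List.pyRange 0 (PySem.List.len topping - 1) 1).foldl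
    (fun res i =>
      if PySem.List.pyGetD leftU i 0 = PySem.List.pyGetD rightU (i + 1) 0 then res + 1 else res) 0

-- ===== PORT B =====
def solution_alt (topping : List Int) : Int :=
  let right := topping.foldl (fun (d : PySem.Dict Int Int) t => d.insert t (d.getD t 0 + 1))
      PySem.Dict.empty
  -- right[t] -= 1: the key t is always present (t lies in the still-uncounted suffix), so getD is exact
  let fin := (PySem.List.slice topping none (some (-1))).foldl
    (fun (st : PySem.Set Int × PySem.Dict Int Int × Int) t =>
      let left := PySem.Set.add st.1 t
      let r1 := st.2.1.insert t (st.2.1.getD t 0 - 1)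
      let r2 := if r1.getD t 0 = 0 then r1.erase t else r1
      (left, r2, if PySem.Set.len left = (r2.size : Int) then st.2.2 + 1 else st.2.2))
    (PySem.Set.empty, right, 0)
  fin.2.2

-- ===== PRECONDITION & SPEC =====
def Spec_solution (topping : List Int) (out : Int) : Prop := out = solution_alt topping
instance (topping : List Int) (out : Int) : Decidable (Spec_solution topping out) := by unfold Spec_solution; infer_instance

-- ===== CLAIM (what is proved, stated in full; the proofs are below) =====
def Claim_equal_solution : Prop := ∀ (topping : List Int), Dom_solution topping → Spec_solution topping (solution topping)

-- ===== LEMMAS AND PROOFS =====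

/-- number of distinct elements of a list -/
def dct (xs : List Int) : Nat := xs.toFinset.card

/-- the prefix distinct-counts list produced by A's first two loops -/
def pcs (p l : List Int) : List Int :=
  match l with
  | [] => []
  | t :: ts => ((dct (p ++ [t]) : Int)) :: pcs (p ++ [t]) ts

/-- B's per-cut indicator sum -/
def cnt (p l rest : List Int) : Int :=
  match l with
  | [] => 0
  | t :: ts => (if dct (p ++ [t]) = dct (ts ++ rest) then 1 else 0) + cnt (p ++ [t]) ts rest

lemma len_ofList (xs : List Int) : (PySem.Set.ofList xs).length = dct xs := by
  have hnd := PySem.Set.nodup_ofList xs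
  have h2 : (PySem.Set.ofList xs).toFinset = xs.toFinset := by
    ext y; simp [PySem.Set.mem_ofList]
  rw [dct, ← h2, List.toFinset_card_of_nodup hnd]

lemma pcs_length (l : List Int) : ∀ p, (pcs p l).length = l.length := by
  induction l with
  | nil => intro p; rfl
  | cons t ts ih => intro p; simp [pcs, ih]

lemma pcs_getElem (l : List Int) : ∀ (p : List Int) (i : Nat) (h : i < l.length),
    (pcs p l)[i]'(by rw [pcs_length]; exact h) = ((dct (p ++ l.take (i + 1)) : Int)) := by
  induction l with
  | nil => intro p i h; simp at h
  | cons t ts ih =>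
    intro p i h
    cases i with
    | zero => simp [pcs]
    | succ j =>
      have hj : j < ts.length := by simpa using h
      simpa [pcs, List.append_assoc] using ih (p ++ [t]) j hj

lemma foldA (l : List Int) : ∀ (p acc : List Int),
    (l.foldl (fun (st : PySem.Set Int × List Int) t =>
      let s := PySem.Set.add st.1 t
      (s, st.2 ++ [PySem.Set.len s])) (PySem.Set.ofList p, acc)).2 = acc ++ pcs p l := by
  induction l with
  | nil => intro p acc; simp [pcs]
  | cons t ts ih =>
    intro p acc
    have hs : PySem.Set.add (PySem.Set.ofList p) t = PySem.Set.ofList (p ++ [t]) :=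
      (PySem.Set.ofList_append_singleton p t).symm
    simp only [List.foldl_cons, hs]
    rw [ih (p ++ [t]) (acc ++ [PySem.Set.len (PySem.Set.ofList (p ++ [t]))])]
    simp [pcs, PySem.Set.len, len_ofList]

/-- the dict state B maintains: the counts of the multiset m, zero-count keys absent -/
def DInv (d : PySem.Dict Int Int) (m : List Int) : Prop :=
  d.keys.Nodup ∧ ∀ k : Int, d.get? k = if m.count k = 0 then none else some ((m.count k : Int))

lemma DInv_size {d : PySem.Dict Int Int} {m : List Int} (h : DInv d m) : d.size = dct m := by
  obtain ⟨hnd, hg⟩ := h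
  have hmem : ∀ k : Int, k ∈ d.keys ↔ k ∈ m := by
    intro k
    rw [← not_iff_not, ← PySem.Dict.get?_eq_none_iff_not_mem_keys, hg k]
    by_cases hc : m.count k = 0
    · rw [List.count_eq_zero] at hc; simp [List.count_eq_zero.mpr hc, hc]
    · simp [hc, List.count_pos_iff.mp (Nat.pos_of_ne_zero hc)]
  have hsz : d.size = d.keys.length := by
    simp [PySem.Dict.size, PySem.Dict.keys]
  have hfs : d.keys.toFinset = m.toFinset := by ext y; simp [hmem]
  rw [hsz, ← List.toFinset_card_of_nodup hnd, hfs, dct]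

lemma DInv_counter (xs : List Int) : DInv (PySem.Dict.counter xs) xs := by
  refine ⟨by rw [PySem.Dict.keys_counter]; exact PySem.Set.nodup_ofList xs, ?_⟩
  intro k
  by_cases hc : xs.count k = 0
  · rw [if_pos hc, PySem.Dict.get?_eq_none_iff_not_mem_keys, PySem.Dict.keys_counter,
      PySem.Set.mem_ofList]
    exact List.count_eq_zero.mp hc
  · have hm : k ∈ (PySem.Dict.counter xs).keys := by
      rw [PySem.Dict.keys_counter, PySem.Set.mem_ofList]
      exact List.count_pos_iff.mp (Nat.pos_of_ne_zero hc)
    have hne : (PySem.Dict.counter xs).get? k ≠ none := by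
      rw [ne_eq, PySem.Dict.get?_eq_none_iff_not_mem_keys]; simpa using hm
    obtain ⟨v, hv⟩ := Option.ne_none_iff_exists'.mp hne
    have hgd := PySem.Dict.getD_counter xs k
    rw [PySem.Dict.getD_eq_get?_getD, hv] at hgd
    simp only [Option.getD_some] at hgd
    rw [hv, if_neg hc, hgd]

lemma find?_filter_key_ne (l : List (Int × Int)) (k x : Int) (hx : x ≠ k) :
    (l.filter (fun p => !(p.1 == k))).find? (fun p => p.1 == x)
      = l.find? (fun p => p.1 == x) := by
  have hkx : (k == x) = false := by simp [Ne.symm hx]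
  have hxk : (x == k) = false := by simp [hx]
  induction l with
  | nil => rfl
  | cons q l ih =>
    by_cases hq : q.1 = k
    · simp [hq, hkx, ih]
    · by_cases hqx : q.1 = x
      · simp [hqx, hxk]
      · simp [hq, hqx, ih]

lemma get?_erase (d : PySem.Dict Int Int) (k x : Int) :
    (d.erase k).get? x = if x = k then none else d.get? x := by
  by_cases hx : x = k
  · subst hx
    rw [if_pos rfl]
    simp only [PySem.Dict.get?, PySem.Dict.erase, Option.map_eq_none_iff]
    rw [List.find?_eq_none]
    intro p hp
    have := List.of_mem_filter hp
    simp at this ⊢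
    exact this
  · rw [if_neg hx]
    simp only [PySem.Dict.get?, PySem.Dict.erase]
    rw [find?_filter_key_ne _ _ _ hx]

lemma keys_erase_nodup (d : PySem.Dict Int Int) (k : Int) (h : d.keys.Nodup) :
    (d.erase k).keys.Nodup := by
  have hsub : (d.erase k).keys.Sublist d.keys := by
    simp only [PySem.Dict.keys, PySem.Dict.erase]
    exact List.Sublist.map _ List.filter_sublist
  exact h.sublist hsub

lemma DInv_step {d : PySem.Dict Int Int} {t : Int} {m : List Int} (h : DInv d (t :: m)) :
    DInv (if (d.insert t (d.getD t 0 - 1)).getD t 0 = 0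
          then (d.insert t (d.getD t 0 - 1)).erase t
          else d.insert t (d.getD t 0 - 1)) m := by
  obtain ⟨hnd, hg⟩ := h
  have hct : (t :: m).count t = m.count t + 1 := by simp
  have hgt : d.getD t 0 = ((m.count t : Int) + 1) := by
    rw [PySem.Dict.getD_eq_get?_getD, hg t, if_neg (by omega), Option.getD_some]
    push_cast [hct]; ring
  have hr1 : (d.insert t (d.getD t 0 - 1)).getD t 0 = (m.count t : Int) := by
    rw [PySem.Dict.getD_insert_self, hgt]; ring
  have hg1 : ∀ x : Int, (d.insert t (d.getD t 0 - 1)).get? x =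
      if x = t then some ((m.count t : Int)) else d.get? x := by
    intro x
    rw [PySem.Dict.get?_insert]
    by_cases hx : x = t
    · rw [if_pos hx, if_pos hx, hgt]; norm_num
    · rw [if_neg hx, if_neg hx]
  have hnd1 : (d.insert t (d.getD t 0 - 1)).keys.Nodup := PySem.Dict.nodup_keys_insert _ _ _ hnd
  by_cases hz : m.count t = 0
  · rw [if_pos (by rw [hr1, hz]; norm_num)]
    refine ⟨keys_erase_nodup _ _ hnd1, ?_⟩
    intro x
    rw [get?_erase]
    by_cases hx : x = t
    · rw [if_pos hx, hx, if_pos hz]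
    · have hcx : (t :: m).count x = m.count x := by simp [Ne.symm hx]
      rw [if_neg hx, hg1 x, if_neg hx, hg x, hcx]
  · rw [if_neg (by rw [hr1]; exact_mod_cast hz)]
    refine ⟨hnd1, ?_⟩
    intro x
    rw [hg1 x]
    by_cases hx : x = t
    · rw [if_pos hx, hx, if_neg hz]
    · have hcx : (t :: m).count x = m.count x := by simp [Ne.symm hx]
      rw [if_neg hx, hg x, hcx]

lemma foldB (l : List Int) : ∀ (p rest : List Int) (d : PySem.Dict Int Int) (res : Int),
    DInv d (l ++ rest) →
    (l.foldl (fun (st : PySem.Set Int × PySem.Dict Int Int × Int) t =>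
      let left := PySem.Set.add st.1 t
      let r1 := st.2.1.insert t (st.2.1.getD t 0 - 1)
      let r2 := if r1.getD t 0 = 0 then r1.erase t else r1
      (left, r2, if PySem.Set.len left = (r2.size : Int) then st.2.2 + 1 else st.2.2))
      (PySem.Set.ofList p, d, res)).2.2 = res + cnt p l rest := by
  induction l with
  | nil => intro p rest d res _; simp [cnt]
  | cons t ts ih =>
    intro p rest d res hinv
    have hinv' : DInv (if (d.insert t (d.getD t 0 - 1)).getD t 0 = 0
          then (d.insert t (d.getD t 0 - 1)).erase t
          else d.insert t (d.getD t 0 - 1)) (ts ++ rest) := DInv_step (by simpa using hinv)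
    have hs : PySem.Set.add (PySem.Set.ofList p) t = PySem.Set.ofList (p ++ [t]) :=
      (PySem.Set.ofList_append_singleton p t).symm
    have hlen : PySem.Set.len (PySem.Set.ofList (p ++ [t])) = ((dct (p ++ [t]) : Int)) := by
      rw [PySem.Set.len, len_ofList]
    have hsize : ((if (d.insert t (d.getD t 0 - 1)).getD t 0 = 0
          then (d.insert t (d.getD t 0 - 1)).erase t
          else d.insert t (d.getD t 0 - 1)).size : Int) = ((dct (ts ++ rest) : Int)) := by
      rw [DInv_size hinv']
    simp only [List.foldl_cons, hs]
    rw [ih (p ++ [t]) rest _ _ hinv']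
    rw [hlen, hsize, cnt]
    by_cases hc : dct (p ++ [t]) = dct (ts ++ rest)
    · rw [if_pos (by exact_mod_cast hc), if_pos hc]; ring
    · rw [if_neg (by exact_mod_cast hc), if_neg hc]; ring

lemma cnt_eq_countP (l : List Int) : ∀ p rest,
    cnt p l rest = ((List.range l.length).countP
      (fun i => decide (dct (p ++ l.take (i + 1)) = dct (l.drop (i + 1) ++ rest))) : Int) := by
  induction l with
  | nil => intro p rest; simp [cnt]
  | cons t ts ih =>
    intro p rest
    rw [cnt, ih (p ++ [t]) rest]
    rw [List.length_cons, List.range_succ_eq_map, List.countP_cons, List.countP_map]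
    have h0 : (fun i => decide (dct (p ++ (t :: ts).take (i + 1)) = dct ((t :: ts).drop (i + 1) ++ rest))) ∘ Nat.succ
        = fun i => decide (dct ((p ++ [t]) ++ ts.take (i + 1)) = dct (ts.drop (i + 1) ++ rest)) := by
      funext i
      simp [Function.comp, List.take_succ_cons, List.append_assoc]
    rw [h0]
    by_cases hc : dct (p ++ [t]) = dct (ts ++ rest)
    · have : decide (dct (p ++ (t :: ts).take (0 + 1)) = dct ((t :: ts).drop (0 + 1) ++ rest)) = true := by
        simpa using hc
      rw [this, if_pos hc]
      simp; ring
    · have : decide (dct (p ++ (t :: ts).take (0 + 1)) = dct ((t :: ts).drop (0 + 1) ++ rest)) = false := by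
        simpa using hc
      rw [this, if_neg hc]
      simp

lemma A_eq_countP (xs : List Int) :
    solution xs = ((List.range (xs.length - 1)).countP
      (fun i => decide (dct (xs.take (i + 1)) = dct (xs.drop (i + 1)))) : Int) := by
  unfold solution
  simp only []
  have hempty : (PySem.Set.empty : PySem.Set Int) = PySem.Set.ofList [] := rfl
  rw [hempty, foldA, foldA]
  simp only [List.nil_append]
  by_cases hn : xs = []
  · subst hn; simp [PySem.List.pyRange, PySem.List.len]
  · obtain ⟨m, hm⟩ : ∃ m, xs.length = m + 1 :=
      ⟨xs.length - 1, (Nat.succ_pred_eq_of_pos (List.length_pos_iff.mpr hn)).symm⟩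
    have hlen : PySem.List.len xs - 1 = (m : Int) := by
      simp [PySem.List.len, hm]
    rw [hlen, PySem.List.pyRange_zero_natCast, List.foldl_map]
    rw [PySem.List.foldl_congr_mem _ _
      (fun res k => if (fun i => decide (dct (xs.take (i + 1)) = dct (xs.drop (i + 1)))) k = true
        then res + 1 else res) 0 ?_]
    · rw [PySem.List.foldl_count_if]
      rw [hm]
      simp
    · intro acc k hk
      have hk' : k < m := List.mem_range.mp hk
      have hxl : k < xs.length := by omega
      have hbL : k < (pcs [] xs).length := by rw [pcs_length]; omega
      have hbR : k + 1 < (pcs [] xs.reverse).reverse.length := by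
        rw [List.length_reverse, pcs_length, List.length_reverse]; omega
      have hL : PySem.List.pyGetD (pcs [] xs) (↑k) 0 = ((dct (xs.take (k + 1)) : Int)) := by
        rw [PySem.List.pyGetD_natCast, List.getD_eq_getElem _ _ hbL]
        simpa using pcs_getElem xs [] k hxl
      have hR : PySem.List.pyGetD (pcs [] xs.reverse).reverse (↑k + 1) 0
          = ((dct (xs.drop (k + 1)) : Int)) := by
        have hcast : ((k : Int) + 1) = ((k + 1 : Nat) : Int) := by push_cast; ring
        rw [hcast, PySem.List.pyGetD_natCast, List.getD_eq_getElem _ _ hbR]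
        rw [List.getElem_reverse]
        have hb2 : m - k - 1 < xs.reverse.length := by simp [hm]; omega
        have := pcs_getElem xs.reverse [] (m - k - 1) hb2
        simp only [List.nil_append] at this
        have hplen : (pcs [] xs.reverse).length = m + 1 := by
          rw [pcs_length, List.length_reverse]; omega
        have hgoal : (pcs [] xs.reverse)[(pcs [] xs.reverse).length - 1 - (k + 1)]'(by omega) =
            (pcs [] xs.reverse)[m - k - 1]'(by omega) := by
          congr 1
          omega
        rw [hgoal, this]
        have htk : xs.reverse.take (m - k - 1 + 1) = (xs.drop (k + 1)).reverse := by
          rw [List.reverse_drop]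
          congr 1
          simp [hm]; omega
        rw [htk]
        simp [dct, List.toFinset_reverse]
      simp only [hL, hR, decide_eq_true_eq]
      by_cases hc : dct (xs.take (k + 1)) = dct (xs.drop (k + 1))
      · rw [if_pos (by exact_mod_cast hc), if_pos hc]
      · rw [if_neg (by exact_mod_cast hc), if_neg hc]

lemma B_eq_countP (xs : List Int) :
    solution_alt xs = ((List.range (xs.length - 1)).countP
      (fun i => decide (dct (xs.take (i + 1)) = dct (xs.drop (i + 1)))) : Int) := by
  unfold solution_alt
  simp only [PySem.Dict.foldl_insert_getD_add_one_eq_counter, PySem.List.slice_to_neg_one]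
  have hsplit : xs.dropLast ++ xs.drop (xs.length - 1) = xs := by
    rw [List.dropLast_eq_take, List.take_append_drop]
  have hempty : (PySem.Set.empty : PySem.Set Int) = PySem.Set.ofList [] := rfl
  rw [hempty]
  rw [foldB xs.dropLast [] (xs.drop (xs.length - 1)) (PySem.Dict.counter xs) 0
    (by rw [hsplit]; exact DInv_counter xs)]
  rw [cnt_eq_countP, zero_add, List.length_dropLast]
  congr 1
  apply List.countP_congr
  intro i hi
  have hi' : i < xs.length - 1 := List.mem_range.mp hi
  have h1 : [] ++ xs.dropLast.take (i + 1) = xs.take (i + 1) := by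
    rw [List.nil_append, List.dropLast_eq_take, List.take_take]
    congr 1
    omega
  have h2 : xs.dropLast.drop (i + 1) ++ xs.drop (xs.length - 1) = xs.drop (i + 1) := by
    rw [List.dropLast_eq_take, List.drop_take]
    have hdd : xs.drop (xs.length - 1) = (xs.drop (i + 1)).drop (xs.length - 1 - (i + 1)) := by
      rw [List.drop_drop]
      congr 1
      omega
    rw [hdd, List.take_append_drop]
  rw [h1, h2]

-- ===== VERDICT (by name: the statement is the Claim_ definition above) =====
theorem solution_spec : Claim_equal_solution := by
  intro topping _
  unfold Spec_solution
  rw [A_eq_countP, B_eq_countP]
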